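-- pv_equiv track=rewrite | github.com/mamane19/interview-prep-dsa | python/flightPrices.py | flightPrices
-- ===== SOURCE A (Python) =====
-- def flightPrices(prices):
--     # Write your code here
--     if not prices:
--         return 0
--     n = len(prices)
--     dp = [[0, 0] for _ in range(n)]
--     dp[0][0] = prices[0][0]
--     dp[0][1] = prices[0][1]
--     for i in range(1, n):
--         dp[i][0] = min(dp[i - 1][0], dp[i - 1][1]) + prices[i][0]
--         dp[i][1] = min(dp[i - 1][0], dp[i - 1][1]) + prices[i][1]
--     return min(dp[n - 1][0], dp[n - 1][1])
-- ===== SOURCE B (Python) =====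
-- def flightPrices(prices):
--     # Each DP step adds the same min-of-previous to both options, so the
--     # optimum is just the sum of per-row minima.
--     total = 0
--     for p in prices:
--         total += min(p[0], p[1])
--     return total
-- ===== Notes on version B (the rewrite author's own statement) =====
-- stated objective: simpler
-- what changed: Replaced the two-track DP table with a single running sum of min(p[0], p[1]) per row, since each DP step adds the same min-of-previous term to both options.
import Mathlib
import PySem

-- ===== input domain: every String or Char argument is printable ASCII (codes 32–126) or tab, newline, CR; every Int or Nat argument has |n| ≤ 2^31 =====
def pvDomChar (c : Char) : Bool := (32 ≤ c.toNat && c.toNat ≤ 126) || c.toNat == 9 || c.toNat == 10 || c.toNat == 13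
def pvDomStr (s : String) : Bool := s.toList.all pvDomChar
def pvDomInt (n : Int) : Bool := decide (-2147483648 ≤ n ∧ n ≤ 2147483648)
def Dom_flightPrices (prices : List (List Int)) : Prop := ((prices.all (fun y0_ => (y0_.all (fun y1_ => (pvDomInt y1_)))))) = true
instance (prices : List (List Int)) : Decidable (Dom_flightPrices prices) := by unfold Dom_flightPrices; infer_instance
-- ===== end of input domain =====

-- B replaces the two-track DP table by a single sum of per-row minima (same O(n) cost, simpler).


-- ===== PORT A =====
-- row access p[i]: total wrapper over PySem.List.pyGet?; under Pre_ every row has ≥ 2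
-- entries, so the default 0 is never taken on admitted inputs.
def pvRowGet (p : List Int) (i : Int) : Int := (PySem.List.pyGet? p i).getD 0

-- literal port of A: dp over the remaining rows, carrying the pair (dp[i][0], dp[i][1])
def flightPrices (prices : List (List Int)) : Int :=
  match prices with
  | [] => 0
  | p0 :: rest =>
    let dp := rest.foldl
      (fun (s : Int × Int) p => (min s.1 s.2 + pvRowGet p 0, min s.1 s.2 + pvRowGet p 1))
      (pvRowGet p0 0, pvRowGet p0 1)
    min dp.1 dp.2

-- ===== PORT B =====
def flightPrices_alt (prices : List (List Int)) : Int :=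
  prices.foldl (fun total p => total + min (pvRowGet p 0) (pvRowGet p 1)) 0

-- ===== PRECONDITION & SPEC =====
-- Pre_ excludes inputs with a row of fewer than 2 entries: there A raises IndexError
-- (and B raises the same way).
def Pre_flightPrices (prices : List (List Int)) : Prop :=
  ∀ p ∈ prices, 2 ≤ p.length
instance (prices : List (List Int)) : Decidable (Pre_flightPrices prices) := by
  unfold Pre_flightPrices; infer_instance

def pvWitness_flightPrices : List (List Int) := [[3, 7], [10, 2], [5, 5]]

def Spec_flightPrices (prices : List (List Int)) (out : Int) : Prop := out = flightPrices_alt prices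
instance (prices : List (List Int)) (out : Int) : Decidable (Spec_flightPrices prices out) := by unfold Spec_flightPrices; infer_instance

-- ===== CLAIM (what is proved, stated in full; the proofs are below) =====
def Claim_equal_flightPrices : Prop := ∀ (prices : List (List Int)), Dom_flightPrices prices → Pre_flightPrices prices → Spec_flightPrices prices (flightPrices prices)

-- ===== LEMMAS AND PROOFS =====

-- per-row minimum, the value B accumulates
def pvRowMin (p : List Int) : Int := min (pvRowGet p 0) (pvRowGet p 1)

-- loop invariant: min of A's dp pair after folding rest = min of the start pair + sum of row minima
theorem pv_fold_min (rest : List (List Int)) : ∀ (a b : Int),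
    min (rest.foldl
        (fun (s : Int × Int) p => (min s.1 s.2 + pvRowGet p 0, min s.1 s.2 + pvRowGet p 1))
        (a, b)).1
      (rest.foldl
        (fun (s : Int × Int) p => (min s.1 s.2 + pvRowGet p 0, min s.1 s.2 + pvRowGet p 1))
        (a, b)).2
    = min a b + (rest.map pvRowMin).sum := by
  induction rest with
  | nil => intro a b; simp
  | cons p rest ih =>
    intro a b
    simp only [List.foldl_cons, List.map_cons, List.sum_cons]
    rw [ih]
    have : min (min a b + pvRowGet p 0) (min a b + pvRowGet p 1)
        = min a b + pvRowMin p := by unfold pvRowMin; omega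
    rw [this]
    ring

-- ===== VERDICT (by name: the statement is the Claim_ definition above) =====
theorem flightPrices_spec : Claim_equal_flightPrices := by
  intro prices _ _
  unfold Spec_flightPrices flightPrices flightPrices_alt
  cases prices with
  | nil => simp
  | cons p0 rest =>
    rw [PySem.List.foldl_add (l := p0 :: rest) (a := 0) (fun p => min (pvRowGet p 0) (pvRowGet p 1))]
    dsimp only
    rw [pv_fold_min]
    unfold pvRowMin
    rw [List.map_cons, List.sum_cons]
    omega
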